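-- pv_equiv track=rewrite | github.com/pypi-data/pypi-mirror-398 | packages/scm-python-core/scm_python_core-1.3.0.dev0-py3-none-any.whl/tutils/tstr.py | split_by_low_upper_break
-- ===== SOURCE A (Python) =====
-- def split_by_low_upper_break(statement: str):
--     if len(statement) < 2:
--         return [statement]
--     result: list[str] = []
--     last_index = 0
--     for index in range(len(statement)):
--         if index == 0:
--             continue
--         last_str = statement[index - 1]
--         current_str = statement[index]
--         if last_str.islower() and current_str.isupper():
--             result.append(statement[last_index:index])
--             last_index = index
--     if last_index < len(statement):
--         result.append(statement[last_index : len(statement)])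
--     return result
-- ===== SOURCE B (Python) =====
-- def split_by_low_upper_break(statement: str):
--     if len(statement) < 2:
--         return [statement]
--     breaks = [i for i in range(1, len(statement))
--               if statement[i - 1].islower() and statement[i].isupper()]
--     bounds = [0] + breaks + [len(statement)]
--     return [statement[a:b] for a, b in zip(bounds, bounds[1:])]
-- ===== Notes on version B (the rewrite author's own statement) =====
-- stated objective: alternative
-- what changed: B separates boundary-finding from substring construction: it first collects the break indices, builds the full bounds list, and then slices each consecutive pair via zip, instead of emitting slices inline while tracking last_index in one stateful loop.
import Mathlib
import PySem

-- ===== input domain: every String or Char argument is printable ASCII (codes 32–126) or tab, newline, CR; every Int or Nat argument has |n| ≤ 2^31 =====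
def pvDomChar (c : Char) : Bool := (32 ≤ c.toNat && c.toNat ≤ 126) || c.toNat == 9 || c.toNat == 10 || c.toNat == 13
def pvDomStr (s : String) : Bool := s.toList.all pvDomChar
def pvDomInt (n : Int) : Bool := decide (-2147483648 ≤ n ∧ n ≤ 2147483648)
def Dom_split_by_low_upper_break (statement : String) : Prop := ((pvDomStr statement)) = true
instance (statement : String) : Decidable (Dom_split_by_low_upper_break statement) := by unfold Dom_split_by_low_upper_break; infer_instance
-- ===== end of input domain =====

-- B separates boundary-finding from substring construction (breaks, then bounds, then slices of
-- consecutive bounds) instead of A's single stateful loop that emits slices while tracking last_index.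

-- ===== PORT A =====
def split_by_low_upper_break (statement : String) : List String :=
  if PySem.Str.len statement < 2 then [statement]
  else
    let cs := statement.toList
    let st :=
      (PySem.List.pyRange 0 (cs.length : Int) 1).foldl
        (fun (st : List String × Int) index =>
          if index == 0 then st
          else
            let last_str := PySem.List.pyGetD cs (index - 1) ' '
            let current_str := PySem.List.pyGetD cs index ' '
            if PySem.Chars.islower last_str && PySem.Chars.isupper current_str then
              (st.1 ++ [String.ofList (PySem.List.slice cs (some st.2) (some index))], index)
            else st)
        (([] : List String), (0 : Int))
    if st.2 < (cs.length : Int) then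
      st.1 ++ [String.ofList (PySem.List.slice cs (some st.2) (some (cs.length : Int)))]
    else st.1

-- ===== PORT B =====
def split_by_low_upper_break_alt (statement : String) : List String :=
  if PySem.Str.len statement < 2 then [statement]
  else
    let cs := statement.toList
    let breaks :=
      (PySem.List.pyRange 1 (cs.length : Int) 1).filter
        (fun i => PySem.Chars.islower (PySem.List.pyGetD cs (i - 1) ' ') &&
                  PySem.Chars.isupper (PySem.List.pyGetD cs i ' '))
    let bounds : List Int := 0 :: breaks ++ [(cs.length : Int)]
    (bounds.zip bounds.tail).map
      (fun ab => String.ofList (PySem.List.slice cs (some ab.1) (some ab.2)))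

-- ===== PRECONDITION & SPEC =====
def Spec_split_by_low_upper_break (statement : String) (out : List String) : Prop := out = split_by_low_upper_break_alt statement
instance (statement : String) (out : List String) : Decidable (Spec_split_by_low_upper_break statement out) := by unfold Spec_split_by_low_upper_break; infer_instance

-- ===== CLAIM (what is proved, stated in full; the proofs are below) =====
def Claim_equal_split_by_low_upper_break : Prop := ∀ (statement : String), Dom_split_by_low_upper_break statement → Spec_split_by_low_upper_break statement (split_by_low_upper_break statement)

-- ===== LEMMAS AND PROOFS =====

-- adjacent pairs of l ++ [x]: the old adjacent pairs plus (last of l, x)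
theorem zip_tail_append_singleton {α : Type} (l : List α) (x d : α) (h : l ≠ []) :
    ((l ++ [x]).zip (l ++ [x]).tail) = l.zip l.tail ++ [(l.getLast?.getD d, x)] := by
  induction l with
  | nil => exact absurd rfl h
  | cons a t ih =>
    cases t with
    | nil => simp
    | cons b t' =>
      have ht := ih (by simp)
      simp only [List.cons_append, List.tail_cons] at ht ⊢
      rw [List.zip_cons_cons, ht, List.zip_cons_cons]
      simp

theorem getLast?_cons_concat {α : Type} (a x : α) (l : List α) :
    (a :: (l ++ [x])).getLast? = some x :=
  (List.getLast?_concat : ((a :: l) ++ [x]).getLast? = some x)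

-- A's loop body (guardless), characterized: the accumulated result is the slice of each
-- adjacent pair of (0 :: filtered indices), and last_index is the last such bound.
theorem foldl_body_char (f : Int → Bool) (g : Int → Int → String) (r : List Int) :
    (r.foldl (fun (st : List String × Int) i =>
        if f i then (st.1 ++ [g st.2 i], i) else st) (([] : List String), (0 : Int)))
      = (((0 :: r.filter f).zip (r.filter f)).map (fun p => g p.1 p.2),
         ((0 :: r.filter f).getLast?).getD 0) := by
  induction r using List.reverseRecOn with
  | nil => simp
  | append_singleton r x ih =>
    rw [List.foldl_append, ih]
    by_cases hx : f x = true
    · simp only [List.foldl_cons, List.foldl_nil, hx, if_pos]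
      have hf : (r ++ [x]).filter f = r.filter f ++ [x] := by
        simp [List.filter_append, hx]
      rw [hf]
      have h2 := zip_tail_append_singleton (0 :: r.filter f) x (0 : Int) (by simp)
      simp only [List.cons_append, List.tail_cons] at h2
      rw [h2]
      simp [getLast?_cons_concat]
    · simp only [Bool.not_eq_true] at hx
      simp [hx, List.filter_append]

theorem split_equiv (statement : String) :
    split_by_low_upper_break statement = split_by_low_upper_break_alt statement := by
  unfold split_by_low_upper_break split_by_low_upper_break_alt
  rcases Decidable.em (PySem.Str.len statement < 2) with hlen | hlen
  · rw [if_pos hlen, if_pos hlen]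
  · rw [if_neg hlen, if_neg hlen]
    dsimp only
    set cs := statement.toList with hcs
    have hn : 2 ≤ cs.length := by
      simp only [PySem.Str.len, hcs] at hlen ⊢
      omega
    set f : Int → Bool := fun i =>
      PySem.Chars.islower (PySem.List.pyGetD cs (i - 1) ' ') &&
      PySem.Chars.isupper (PySem.List.pyGetD cs i ' ') with hf
    set g : Int → Int → String := fun a b =>
      String.ofList (PySem.List.slice cs (some a) (some b)) with hg
    -- peel off index 0 and drop the guard
    have hsplit : PySem.List.pyRange 0 (cs.length : Int) 1
        = 0 :: PySem.List.pyRange 1 (cs.length : Int) 1 := by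
      rw [PySem.List.pyRange_one_cons (by exact_mod_cast by omega)]
      norm_num
    have hguard :
        ((PySem.List.pyRange 0 (cs.length : Int) 1).foldl
          (fun (st : List String × Int) index =>
            if index == 0 then st
            else
              if PySem.Chars.islower (PySem.List.pyGetD cs (index - 1) ' ') &&
                 PySem.Chars.isupper (PySem.List.pyGetD cs index ' ') then
                (st.1 ++ [String.ofList (PySem.List.slice cs (some st.2) (some index))], index)
              else st)
          (([] : List String), (0 : Int)))
        = ((PySem.List.pyRange 1 (cs.length : Int) 1).foldl
            (fun (st : List String × Int) i =>
              if f i then (st.1 ++ [g st.2 i], i) else st)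
            (([] : List String), (0 : Int))) := by
      rw [hsplit, List.foldl_cons]
      simp only [beq_self_eq_true, if_pos]
      apply PySem.List.foldl_congr_mem
      intro acc x hx
      have hx1 : (1 : Int) ≤ x := (PySem.List.mem_pyRange_one.mp hx).1
      have hne : (x == 0) = false := by simp; omega
      simp [hne, hf, hg]
    rw [hguard, foldl_body_char f g]
    set breaks := (PySem.List.pyRange 1 (cs.length : Int) 1).filter f with hbr
    obtain ⟨m, hm⟩ : ∃ m, (0 :: breaks).getLast? = some m := by
      cases hb : (0 :: breaks).getLast? with
      | none => simp at hb
      | some m => exact ⟨m, rfl⟩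
    have hmem : m ∈ (0 :: breaks) := List.mem_of_getLast? hm
    have hlast_lt : ((0 :: breaks).getLast?).getD 0 < (cs.length : Int) := by
      rw [hm]
      rcases List.mem_cons.mp hmem with h0 | hb
      · simpa [h0] using (by exact_mod_cast by omega : (0 : Int) < (cs.length : Int))
      · exact (PySem.List.mem_pyRange_one.mp (List.mem_of_mem_filter hb)).2
    simp only [hlast_lt, if_pos]
    have h2 := zip_tail_append_singleton (0 :: breaks) ((cs.length : Int)) (0 : Int) (by simp)
    rw [h2]
    simp [hg]

-- ===== VERDICT (by name: the statement is the Claim_ definition above) =====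
theorem split_by_low_upper_break_spec : Claim_equal_split_by_low_upper_break := by
  intro statement _
  unfold Spec_split_by_low_upper_break
  exact split_equiv statement
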